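-- pv_equiv track=rewrite | github.com/Young0109/CS4810-Project | evaluation/benchmark_query.py | generate_ips
-- ===== SOURCE A (Python) =====
-- def generate_ips(n):
--     ips = []
--     for i in range(n):
--         a = (i >> 24) & 0xFF
--         b = (i >> 16) & 0xFF
--         c = (i >> 8) & 0xFF
--         d = i & 0xFF
--         ips.append(f"{a}.{b}.{c}.{d}")
--     return ips
-- ===== SOURCE B (Python) =====
-- def generate_ips(n):
--     ips = []
--     a = b = c = d = 0
--     for _ in range(n):
--         ips.append(f"{a}.{b}.{c}.{d}")
--         d += 1
--         if d == 256:
--             d = 0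
--             c += 1
--         if c == 256:
--             c = 0
--             b += 1
--         if b == 256:
--             b = 0
--             a += 1
--         if a == 256:
--             a = 0
--     return ips
-- ===== Notes on version B (the rewrite author's own statement) =====
-- stated objective: alternative
-- what changed: B replaces A's per-iteration bit-shift/mask recomputation of the four octets with a four-counter odometer carried across iterations (increment with explicit carry at 256).
import Mathlib
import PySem

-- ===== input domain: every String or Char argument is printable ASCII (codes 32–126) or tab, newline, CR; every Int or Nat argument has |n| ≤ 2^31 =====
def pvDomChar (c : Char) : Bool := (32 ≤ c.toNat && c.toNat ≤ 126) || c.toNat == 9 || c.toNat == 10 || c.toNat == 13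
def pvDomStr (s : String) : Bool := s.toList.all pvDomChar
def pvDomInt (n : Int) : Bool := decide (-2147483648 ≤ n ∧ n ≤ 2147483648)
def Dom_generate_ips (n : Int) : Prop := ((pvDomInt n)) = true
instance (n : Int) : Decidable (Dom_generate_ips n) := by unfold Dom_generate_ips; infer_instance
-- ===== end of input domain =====

-- B replaces A's per-iteration bit-shift/mask octet recomputation with a four-counter
-- odometer carried across iterations (objective: alternative decomposition, same cost).

-- ===== PORT A =====
def generate_ips (n : Int) : List String :=
  (PySem.List.pyRange 0 n 1).foldl
    (fun ips (i : Int) =>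
      let a := PySem.Int.band (i >>> (24:Nat)) 255
      let b := PySem.Int.band (i >>> (16:Nat)) 255
      let c := PySem.Int.band (i >>> (8:Nat)) 255
      let d := PySem.Int.band i 255
      ips ++ [PySem.Int.toStr a ++ "." ++ PySem.Int.toStr b ++ "." ++
              PySem.Int.toStr c ++ "." ++ PySem.Int.toStr d])
    []

-- ===== PORT B =====
def ipOdometer : Nat → Int → Int → Int → Int → List String → List String
  | 0, _, _, _, _, ips => ips
  | k + 1, a, b, c, d, ips =>
    let ips1 := ips ++ [PySem.Int.toStr a ++ "." ++ PySem.Int.toStr b ++ "." ++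
                        PySem.Int.toStr c ++ "." ++ PySem.Int.toStr d]
    let d1 := d + 1
    let d2 := if d1 = 256 then 0 else d1
    let c1 := if d1 = 256 then c + 1 else c
    let c2 := if c1 = 256 then 0 else c1
    let b1 := if c1 = 256 then b + 1 else b
    let b2 := if b1 = 256 then 0 else b1
    let a1 := if b1 = 256 then a + 1 else a
    let a2 := if a1 = 256 then 0 else a1
    ipOdometer k a2 b2 c2 d2 ips1

def generate_ips_alt (n : Int) : List String :=
  ipOdometer n.toNat 0 0 0 0 []

-- ===== PRECONDITION & SPEC =====
def Spec_generate_ips (n : Int) (out : List String) : Prop := out = generate_ips_alt n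
instance (n : Int) (out : List String) : Decidable (Spec_generate_ips n out) := by unfold Spec_generate_ips; infer_instance

-- ===== CLAIM (what is proved, stated in full; the proofs are below) =====
def Claim_equal_generate_ips : Prop := ∀ (n : Int), Dom_generate_ips n → Spec_generate_ips n (generate_ips n)

-- ===== LEMMAS AND PROOFS =====

/-- the formatted string for index `i`, octets expressed as Nat div/mod. -/
def fmtN (i : Nat) : String :=
  PySem.Int.toStr ((i / 16777216 % 256 : Nat) : Int) ++ "." ++
  PySem.Int.toStr ((i / 65536 % 256 : Nat) : Int) ++ "." ++
  PySem.Int.toStr ((i / 256 % 256 : Nat) : Int) ++ "." ++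
  PySem.Int.toStr ((i % 256 : Nat) : Int)

theorem band_shift_octet (k s : Nat) :
    PySem.Int.band ((k : Int) >>> s) 255 = ((k / 2 ^ s % 256 : Nat) : Int) := by
  rw [show ((k : Int) >>> s) = ((k >>> s : Nat) : Int) from (Int.natCast_shiftRight k s).symm]
  rw [show (255 : Int) = ((255 : Nat) : Int) from rfl, PySem.Int.band_natCast]
  norm_cast
  rw [Nat.shiftRight_eq_div_pow]
  rw [show (255 : Nat) = 2 ^ 8 - 1 from rfl, Nat.and_two_pow_sub_one_eq_mod]

theorem foldl_append_map {α β : Type} (f : α → β) :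
    ∀ (l : List α) (acc : List β),
      l.foldl (fun a x => a ++ [f x]) acc = acc ++ l.map f := by
  intro l
  induction l with
  | nil => simp
  | cons x xs ih => intro acc; simp [List.foldl, ih]

theorem ipOdometer_inv :
    ∀ (k i : Nat) (a b c d : Int) (acc : List String),
      a = ((i / 16777216 % 256 : Nat) : Int) →
      b = ((i / 65536 % 256 : Nat) : Int) →
      c = ((i / 256 % 256 : Nat) : Int) →
      d = ((i % 256 : Nat) : Int) →
      ipOdometer k a b c d acc = acc ++ (List.range k).map (fun j => fmtN (i + j)) := by
  intro k
  induction k with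
  | zero => intro i a b c d acc _ _ _ _; simp [ipOdometer]
  | succ k ih =>
    intro i a b c d acc ha hb hc hd
    subst ha hb hc hd
    show ipOdometer (k + 1) _ _ _ _ acc = _
    rw [ipOdometer]
    rw [ih (i + 1) _ _ _ _ _
      (by split_ifs <;> omega) (by split_ifs <;> omega)
      (by split_ifs <;> omega) (by split_ifs <;> omega)]
    rw [List.range_succ_eq_map, List.map_cons, List.map_map]
    have hcomp : ((fun j => fmtN (i + j)) ∘ Nat.succ) = fun j => fmtN (i + 1 + j) := by
      funext j
      simp only [Function.comp]
      congr 1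
      omega
    rw [hcomp, Nat.add_zero]
    simp [fmtN, List.append_assoc]

theorem generate_ips_eq_map (n : Int) :
    generate_ips n = (List.range n.toNat).map fmtN := by
  unfold generate_ips
  rw [PySem.List.pyRange_one, foldl_append_map]
  simp only [Int.sub_zero, List.nil_append, List.map_map]
  refine List.map_congr_left ?_
  intro k _
  simp only [Function.comp]
  rw [show ((0 : Int) + k) = (k : Int) from by omega]
  rw [show PySem.Int.band (k : Int) 255 = PySem.Int.band ((k : Int) >>> (0:Nat)) 255 from rfl]
  rw [band_shift_octet k 24, band_shift_octet k 16, band_shift_octet k 8, band_shift_octet k 0]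
  norm_num [fmtN]

-- ===== VERDICT (by name: the statement is the Claim_ definition above) =====
theorem generate_ips_spec : Claim_equal_generate_ips := by
  intro n _
  unfold Spec_generate_ips generate_ips_alt
  rw [ipOdometer_inv n.toNat 0 0 0 0 0 [] rfl rfl rfl rfl, generate_ips_eq_map]
  simp
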